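-- pv_equiv track=rewrite | github.com/yaoguany/ConvJudge | evaluate_simulated_conversations.py | infer_category_titles
-- ===== SOURCE A (Python) =====
-- from typing import Any, Dict, Sequence
--
-- def infer_category_titles(oracle: dict[str, Any]) -> Dict[str, str]:
--     titles = {
--         "cat1": "Category 1: Universal Compliance",
--         "cat2": "Category 2: Intent Triggered Guidelines",
--         "cat3": "Category 3: Condition Triggered Guidelines",
--     }
--     for key in oracle.keys():
--         low = key.lower()
--         if low.startswith("category 1"):
--             titles["cat1"] = key
--         elif low.startswith("category 2"):
--             titles["cat2"] = key
--         elif low.startswith("category 3"):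
--             titles["cat3"] = key
--     return titles
-- ===== SOURCE B (Python) =====
-- def infer_category_titles(oracle):
--     def last_match(prefix, default):
--         for key in reversed(list(oracle)):
--             if key.lower().startswith(prefix):
--                 return key
--         return default
--     return {
--         "cat1": last_match("category 1", "Category 1: Universal Compliance"),
--         "cat2": last_match("category 2", "Category 2: Intent Triggered Guidelines"),
--         "cat3": last_match("category 3", "Category 3: Condition Triggered Guidelines"),
--     }
-- ===== Notes on version B (the rewrite author's own statement) =====
-- stated objective: alternative
-- what changed: Replaces A's single forward pass with mutable elif-updated dict state by three independent per-slot backward scans that early-return the first (i.e. last-in-order) matching key, defaulting otherwise; correct because the three prefixes are mutually exclusive.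
import Mathlib
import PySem

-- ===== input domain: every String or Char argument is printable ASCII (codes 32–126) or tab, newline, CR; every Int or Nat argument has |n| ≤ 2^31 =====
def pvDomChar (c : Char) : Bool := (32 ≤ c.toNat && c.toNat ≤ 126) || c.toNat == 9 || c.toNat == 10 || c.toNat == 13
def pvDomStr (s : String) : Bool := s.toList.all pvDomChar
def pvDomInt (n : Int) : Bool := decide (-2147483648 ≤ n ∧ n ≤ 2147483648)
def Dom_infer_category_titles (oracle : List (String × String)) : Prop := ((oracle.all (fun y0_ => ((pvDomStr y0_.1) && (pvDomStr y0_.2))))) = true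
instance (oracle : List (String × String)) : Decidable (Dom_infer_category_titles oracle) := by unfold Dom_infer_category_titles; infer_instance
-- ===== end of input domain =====

-- B replaces A's single forward pass with elif-updated dict state by three independent
-- backward scans (first match from the end wins, default otherwise); same values, no speed claim.


-- ===== PORT A =====
-- A iterates oracle.keys(): the dict's keys in insertion order, duplicates collapsed
-- (PySem.List.dedup), updating a 3-key dict via if/elif/elif.
def infer_category_titles (oracle : List (String × String)) : List (String × String) :=
  let titles : PySem.Dict String String := PySem.Dict.ofList
    [("cat1", "Category 1: Universal Compliance"),
     ("cat2", "Category 2: Intent Triggered Guidelines"),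
     ("cat3", "Category 3: Condition Triggered Guidelines")]
  let titles := (PySem.List.dedup (oracle.map Prod.fst)).foldl (fun titles key =>
    let low := PySem.Str.lower key
    if PySem.Str.startswith low "category 1" then titles.insert "cat1" key
    else if PySem.Str.startswith low "category 2" then titles.insert "cat2" key
    else if PySem.Str.startswith low "category 3" then titles.insert "cat3" key
    else titles) titles
  titles.items

-- ===== PORT B =====
-- B's helper last_match: scan the reversed key list, early-return the first match, else default.
def lastMatchKey (keysRev : List String) (pfx dflt : String) : String :=
  match keysRev with
  | [] => dflt
  | k :: rest =>
      if PySem.Str.startswith (PySem.Str.lower k) pfx then k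
      else lastMatchKey rest pfx dflt

def infer_category_titles_alt (oracle : List (String × String)) : List (String × String) :=
  let keysRev := (PySem.List.dedup (oracle.map Prod.fst)).reverse
  [("cat1", lastMatchKey keysRev "category 1" "Category 1: Universal Compliance"),
   ("cat2", lastMatchKey keysRev "category 2" "Category 2: Intent Triggered Guidelines"),
   ("cat3", lastMatchKey keysRev "category 3" "Category 3: Condition Triggered Guidelines")]

-- ===== PRECONDITION & SPEC =====
def Spec_infer_category_titles (oracle : List (String × String)) (out : List (String × String)) : Prop := out = infer_category_titles_alt oracle
instance (oracle : List (String × String)) (out : List (String × String)) : Decidable (Spec_infer_category_titles oracle out) := by unfold Spec_infer_category_titles; infer_instance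

-- ===== CLAIM (what is proved, stated in full; the proofs are below) =====
def Claim_equal_infer_category_titles : Prop := ∀ (oracle : List (String × String)), Dom_infer_category_titles oracle → Spec_infer_category_titles oracle (infer_category_titles oracle)

-- ===== LEMMAS AND PROOFS =====

-- last_match over ys ++ [x] folds x into the default (last match wins).
theorem lastMatchKey_append_singleton (ys : List String) (x pfx dflt : String) :
    lastMatchKey (ys ++ [x]) pfx dflt
      = lastMatchKey ys pfx
          (if PySem.Str.startswith (PySem.Str.lower x) pfx then x else dflt) := by
  induction ys with
  | nil => simp [lastMatchKey]
  | cons y ys ih => simp [lastMatchKey, ih]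

-- the three prefixes are mutually exclusive
theorem startswith_excl (s : String) (p q : String)
    (hlen : p.toList.length = q.toList.length) (hne : p.toList ≠ q.toList)
    (hp : PySem.Str.startswith s p = true) : PySem.Str.startswith s q = false := by
  by_contra h
  have hq : PySem.Str.startswith s q = true := by
    cases hq : PySem.Str.startswith s q with
    | true => rfl
    | false => exact absurd hq h
  rw [PySem.Str.startswith_eq] at hp hq
  have hp' := (PySem.Chars.startswith_iff _ _).mp hp
  have hq' := (PySem.Chars.startswith_iff _ _).mp hq
  rw [List.prefix_iff_eq_take] at hp' hq'
  exact hne (hp'.trans (by rw [hlen, ← hq']))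

-- the fold of A over any key list, from arbitrary dict values, is B's three backward scans
theorem fold_eq_scans (l : List String) (a b c : String) :
    ((l.foldl (fun titles key =>
        let low := PySem.Str.lower key
        if PySem.Str.startswith low "category 1" then titles.insert "cat1" key
        else if PySem.Str.startswith low "category 2" then titles.insert "cat2" key
        else if PySem.Str.startswith low "category 3" then titles.insert "cat3" key
        else titles)
      (PySem.Dict.ofList [("cat1", a), ("cat2", b), ("cat3", c)])).items)
    = [("cat1", lastMatchKey l.reverse "category 1" a),
       ("cat2", lastMatchKey l.reverse "category 2" b),
       ("cat3", lastMatchKey l.reverse "category 3" c)] := by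
  induction l generalizing a b c with
  | nil =>
      simp only [List.foldl_nil, List.reverse_nil, lastMatchKey]
      rfl
  | cons x l ih =>
      have h1 : ∀ v, (PySem.Dict.ofList [("cat1", a), ("cat2", b), ("cat3", c)]).insert "cat1" v
          = PySem.Dict.ofList [("cat1", v), ("cat2", b), ("cat3", c)] := fun v => rfl
      have h2 : ∀ v, (PySem.Dict.ofList [("cat1", a), ("cat2", b), ("cat3", c)]).insert "cat2" v
          = PySem.Dict.ofList [("cat1", a), ("cat2", v), ("cat3", c)] := fun v => rfl
      have h3 : ∀ v, (PySem.Dict.ofList [("cat1", a), ("cat2", b), ("cat3", c)]).insert "cat3" v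
          = PySem.Dict.ofList [("cat1", a), ("cat2", b), ("cat3", v)] := fun v => rfl
      simp only [List.foldl_cons, List.reverse_cons, lastMatchKey_append_singleton]
      by_cases c1 : PySem.Str.startswith (PySem.Str.lower x) "category 1" = true
      · have e2 := startswith_excl (PySem.Str.lower x) "category 1" "category 2" (by decide) (by decide) c1
        have e3 := startswith_excl (PySem.Str.lower x) "category 1" "category 3" (by decide) (by decide) c1
        simp only [c1, e2, e3, if_true, if_false, h1, ih, Bool.false_eq_true]
      · by_cases c2 : PySem.Str.startswith (PySem.Str.lower x) "category 2" = true
        · have e3 := startswith_excl (PySem.Str.lower x) "category 2" "category 3" (by decide) (by decide) c2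
          simp only [c1, c2, e3, if_true, if_false, h2, ih, Bool.false_eq_true]
        · by_cases c3 : PySem.Str.startswith (PySem.Str.lower x) "category 3" = true
          · simp only [c1, c2, c3, if_true, if_false, h3, ih, Bool.false_eq_true]
          · simp only [c1, c2, c3, if_false, ih, Bool.false_eq_true]

-- ===== VERDICT (by name: the statement is the Claim_ definition above) =====
theorem infer_category_titles_spec : Claim_equal_infer_category_titles := by
  intro oracle _
  unfold Spec_infer_category_titles infer_category_titles infer_category_titles_alt
  exact fold_eq_scans _ _ _ _
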